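-- pv_equiv track=rewrite | github.com/FirasBDarwish/Accelerated-FMPE | train_all.py | diamond_hidden_dims
-- ===== SOURCE A (Python) =====
-- from typing import Dict, Any, Iterable, List, Tuple
-- from typing import List
--
-- def diamond_hidden_dims(
--     max_width_pow: int,
--     num_blocks: int,
--     min_pow: int = 4,
--     peak_repeats: int | None = None,
-- ) -> List[int]:
--     """
--     Build a diamond-shaped list of hidden dims with exactly num_blocks elements.
--     - Widths are powers of two (2^k), k integer.
--     - Ascend from 2^min_pow up to 2^max_width_pow, add a flat peak (peak_repeats),
--       then descend.
--     - If the result is too long, trim from the descending side starting just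
--       below the peak to preserve the 'fat top' look.
--
--     Args:
--         max_width_pow: exponent for the maximum width (e.g., 10 -> 1024).
--         num_blocks: desired total number of layers.
--         min_pow: exponent for the minimum width (default 4 -> 16).
--         peak_repeats: how many times to repeat the peak width (default computed
--                       to minimally reach num_blocks, but you can set it, e.g. 3).
--
--     Returns:
--         List[int] of length == num_blocks.
--     """
--     assert num_blocks >= 1, "num_blocks must be >= 1"
--     assert max_width_pow >= min_pow, "max_width_pow must be >= min_pow"
--
--     # Ascend powers
--     up_pows = list(range(min_pow, max_width_pow + 1))   # e.g., [5,6,7,8,9,10]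
--     down_pows = up_pows[-2::-1]                         # mirror without peak
--     base_pows = up_pows + down_pows                     # classic diamond
--     base_len = len(base_pows)
--
--     # Minimal peak repeats to *at least* reach num_blocks
--     if peak_repeats is None:
--         # base already has 1 peak; extra repeats needed:
--         extra = max(0, num_blocks - base_len)
--         peak_repeats = 1 + extra
--
--     # Build with plateau at the peak
--     max_pow = max_width_pow
--     up_no_peak = up_pows[:-1]                           # everything before peak
--     peak = [max_pow] * peak_repeats
--     desc = down_pows[:]                                 # copy to trim if needed
--     pows = up_no_peak + peak + desc
--
--     # If too long, trim from the descending side starting just below the peak.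
--     # This removes the first element(s) after the plateau (e.g., 2^(max_pow-1), then 2^(max_pow-2), ...)
--     overflow = len(pows) - num_blocks
--     trim_idx = 0  # index into 'desc' to trim (0 = just below peak)
--     while overflow > 0 and trim_idx < len(desc):
--         # remove desc[trim_idx] from 'pows'
--         to_remove = desc[trim_idx]
--         # find first occurrence of that power after the plateau start
--         # plateau ends at len(up_no_peak) + peak_repeats - 1
--         plateau_end = len(up_no_peak) + peak_repeats
--         # locate in pows[plateau_end:] and delete one
--         for i in range(plateau_end, len(pows)):
--             if pows[i] == to_remove:
--                 del pows[i]
--                 break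
--         overflow -= 1
--         trim_idx += 1
--
--     # If still too long (very edge cases), trim from the tail
--     if len(pows) > num_blocks:
--         pows = pows[:num_blocks]
--
--     return [2 ** k for k in pows]
-- ===== SOURCE B (Python) =====
-- from typing import List
--
-- def diamond_hidden_dims(
--     max_width_pow: int,
--     num_blocks: int,
--     min_pow: int = 4,
--     peak_repeats: int | None = None,
-- ) -> List[int]:
--     """Diamond-shaped power-of-two widths, built directly: ascend, plateau,
--     then the descending side with its leading (just-below-peak) elements
--     dropped to fit, and a final tail trim -- no search/delete loop."""
--     assert num_blocks >= 1, "num_blocks must be >= 1"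
--     assert max_width_pow >= min_pow, "max_width_pow must be >= min_pow"
--
--     up_no_peak = list(range(min_pow, max_width_pow))
--     if peak_repeats is None:
--         peak_repeats = 1 + max(0, num_blocks - (2 * len(up_no_peak) + 1))
--     peak = [max_width_pow] * peak_repeats
--     desc = list(range(max_width_pow - 1, min_pow - 1, -1))
--
--     overflow = len(up_no_peak) + len(peak) + len(desc) - num_blocks
--     removed = max(0, min(overflow, len(desc)))
--     pows = (up_no_peak + peak + desc[removed:])[:num_blocks]
--     return [2 ** k for k in pows]
-- ===== Notes on version B (the rewrite author's own statement) =====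
-- stated objective: simpler
-- what changed: Replaces A's nested trim loop (repeated linear search for the value just below the peak followed by in-place deletion) with a direct construction: the number of dropped descending elements is computed in closed form and the list is built once as up + plateau + desc[removed:] sliced to num_blocks.
-- outside the precondition, e.g. on diamond_hidden_dims(2, 3, -1, None): A returns [0.5, 1, 2], B returns [0.5, 1, 2]; on diamond_hidden_dims(2, 1, 0, -2): A returns [2], B returns [1]
import Mathlib
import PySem

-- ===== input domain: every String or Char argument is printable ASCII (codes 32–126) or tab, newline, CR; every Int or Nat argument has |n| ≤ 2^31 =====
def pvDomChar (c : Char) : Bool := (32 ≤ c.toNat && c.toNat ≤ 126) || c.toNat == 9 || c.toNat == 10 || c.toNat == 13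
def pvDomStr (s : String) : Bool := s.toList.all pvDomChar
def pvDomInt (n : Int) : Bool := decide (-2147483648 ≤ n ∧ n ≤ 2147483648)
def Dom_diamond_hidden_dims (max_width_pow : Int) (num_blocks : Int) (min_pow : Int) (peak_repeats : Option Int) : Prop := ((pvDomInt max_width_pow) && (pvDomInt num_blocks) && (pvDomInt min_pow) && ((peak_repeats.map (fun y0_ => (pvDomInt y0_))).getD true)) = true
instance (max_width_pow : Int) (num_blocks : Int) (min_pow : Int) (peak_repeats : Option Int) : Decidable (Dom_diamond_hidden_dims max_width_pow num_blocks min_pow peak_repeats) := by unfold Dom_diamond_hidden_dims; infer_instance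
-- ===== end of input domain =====

-- B replaces A's search-and-delete trim loop by a closed-form count of dropped
-- descending elements and a single direct construction (objective: simpler).

-- ===== PORT A =====
-- inner 'for i in range(plateau_end, len(pows)): if pows[i] == to_remove: del pows[i]; break'
-- (indices produced by range are nonnegative on every admitted input, so 'del pows[i]' is eraseIdx i.toNat)
def pvTrimDel (pows : List Int) (idxs : List Int) (v : Int) : List Int :=
  match idxs with
  | [] => pows
  | i :: rest =>
    match PySem.List.pyGet? pows i with
    | some x => if x = v then pows.eraseIdx i.toNat else pvTrimDel pows rest v
    | none => pvTrimDel pows rest v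

-- the 'while overflow > 0 and trim_idx < len(desc)' loop (plateau_end is the same
-- constant each iteration in A, so it is passed as a parameter); if desc[trim_idx]
-- were out of range (never, since trim_idx starts at 0) we return pows
def pvTrimWhile (desc : List Int) (plateau_end : Int) (pows : List Int) (overflow : Int) (trim_idx : Int) : List Int :=
  if _h : 0 < overflow ∧ trim_idx < (desc.length : Int) then
    match PySem.List.pyGet? desc trim_idx with
    | some v =>
        pvTrimWhile desc plateau_end
          (pvTrimDel pows (PySem.List.pyRange plateau_end (pows.length : Int) 1) v)
          (overflow - 1) (trim_idx + 1)
    | none => pows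
  else pows
termination_by overflow.toNat
decreasing_by omega

-- '2 ** k' is exact for k ≥ 0 (guaranteed by Pre_, which demands 0 ≤ min_pow)
def diamond_hidden_dims (max_width_pow : Int) (num_blocks : Int) (min_pow : Int) (peak_repeats : Option Int) : List Int :=
  let up_pows := PySem.List.pyRange min_pow (max_width_pow + 1) 1
  let down_pows := (PySem.List.slice? up_pows (some (-2)) none (-1)).getD []
  let base_pows := up_pows ++ down_pows
  let base_len : Int := base_pows.length
  let pr : Int :=
    match peak_repeats with
    | none => 1 + max 0 (num_blocks - base_len)
    | some p => p
  let max_pow := max_width_pow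
  let up_no_peak := PySem.List.slice up_pows none (some (-1))
  let peak := List.replicate pr.toNat max_pow
  let desc := down_pows
  let pows := up_no_peak ++ peak ++ desc
  let overflow := (pows.length : Int) - num_blocks
  let plateau_end := (up_no_peak.length : Int) + pr
  let pows1 := pvTrimWhile desc plateau_end pows overflow 0
  let pows2 := if (num_blocks : Int) < (pows1.length : Int) then PySem.List.slice pows1 none (some num_blocks) else pows1
  pows2.map (fun k => (2 : Int) ^ k.toNat)

-- ===== PORT B =====
def diamond_hidden_dims_alt (max_width_pow : Int) (num_blocks : Int) (min_pow : Int) (peak_repeats : Option Int) : List Int :=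
  let up_no_peak := PySem.List.pyRange min_pow max_width_pow 1
  let pr : Int :=
    match peak_repeats with
    | none => 1 + max 0 (num_blocks - (2 * (up_no_peak.length : Int) + 1))
    | some p => p
  let peak := List.replicate pr.toNat max_width_pow
  let desc := PySem.List.pyRange (max_width_pow - 1) (min_pow - 1) (-1)
  let overflow := ((up_no_peak.length : Int) + (peak.length : Int) + (desc.length : Int)) - num_blocks
  let removed := max 0 (min overflow (desc.length : Int))
  ((up_no_peak ++ peak ++ desc.drop removed.toNat).take num_blocks.toNat).map (fun k => (2 : Int) ^ k.toNat)

-- ===== PRECONDITION & SPEC =====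
-- Pre_ excludes: inputs failing A's asserts (num_blocks < 1 or max_width_pow < min_pow,
-- AssertionError); min_pow < 0, where '2 ** k' makes A return floats, not ints; and a
-- negative explicit peak_repeats — a negative repeat count outside the natural domain,
-- on which A's search window wraps around (sometimes an IndexError, otherwise an
-- accidental value).
def Pre_diamond_hidden_dims (max_width_pow : Int) (num_blocks : Int) (min_pow : Int) (peak_repeats : Option Int) : Prop :=
  1 ≤ num_blocks ∧ min_pow ≤ max_width_pow ∧ 0 ≤ min_pow ∧ 0 ≤ peak_repeats.getD 0
instance (max_width_pow : Int) (num_blocks : Int) (min_pow : Int) (peak_repeats : Option Int) : Decidable (Pre_diamond_hidden_dims max_width_pow num_blocks min_pow peak_repeats) := by unfold Pre_diamond_hidden_dims; infer_instance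

def pvWitness_diamond_hidden_dims : Int × Int × Int × Option Int := (5, 7, 2, none)

def Spec_diamond_hidden_dims (max_width_pow : Int) (num_blocks : Int) (min_pow : Int) (peak_repeats : Option Int) (out : List Int) : Prop := out = diamond_hidden_dims_alt max_width_pow num_blocks min_pow peak_repeats
instance (max_width_pow : Int) (num_blocks : Int) (min_pow : Int) (peak_repeats : Option Int) (out : List Int) : Decidable (Spec_diamond_hidden_dims max_width_pow num_blocks min_pow peak_repeats out) := by unfold Spec_diamond_hidden_dims; infer_instance

-- ===== CLAIM (what is proved, stated in full; the proofs are below) =====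
def Claim_equal_diamond_hidden_dims : Prop := ∀ (max_width_pow : Int) (num_blocks : Int) (min_pow : Int) (peak_repeats : Option Int), Dom_diamond_hidden_dims max_width_pow num_blocks min_pow peak_repeats → Pre_diamond_hidden_dims max_width_pow num_blocks min_pow peak_repeats → Spec_diamond_hidden_dims max_width_pow num_blocks min_pow peak_repeats (diamond_hidden_dims max_width_pow num_blocks min_pow peak_repeats)

-- ===== LEMMAS AND PROOFS =====

/-- ascending run of `n` consecutive integers starting at `a` -/
def pvAsc (a : Int) (n : Nat) : List Int := List.map (fun i : Nat => a + (i : Int)) (List.range n)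

theorem pyRange_one_eq_asc (a b : Int) (h : a ≤ b) :
    PySem.List.pyRange a b 1 = pvAsc a (b - a).toNat := by
  rw [PySem.List.pyRange_of_pos a b (by norm_num)]
  have h1 : b - a + 1 - 1 = b - a := by ring
  rw [h1, Int.ediv_one]
  have h2 : (if a < b then (b - a).toNat else 0) = (b - a).toNat := by
    split_ifs with h' <;> omega
  rw [h2]
  unfold pvAsc
  simp only [one_mul]

theorem pyRange_down_eq (a b : Int) (h : b ≤ a) :
    PySem.List.pyRange (a - 1) (b - 1) (-1) = (pvAsc b (a - b).toNat).reverse := by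
  simp only [PySem.List.pyRange]
  norm_num
  have h2 : (if b < a then (a - b).toNat else 0) = (a - b).toNat := by
    split_ifs with h' <;> omega
  rw [h2]
  apply List.ext_getElem
  · simp only [List.length_map, List.length_range, List.length_reverse, pvAsc]
  · intro i hi1 hi2
    simp only [List.length_map, List.length_range] at hi1
    rw [List.getElem_reverse]
    simp only [List.getElem_map, List.getElem_range, pvAsc, List.length_map, List.length_range]
    omega

theorem slice?_neg2_asc (a : Int) (L : Nat) :
    PySem.List.slice? (pvAsc a (L + 1)) (some (-2)) none (-1) = some ((pvAsc a L).reverse) := by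
  simp only [PySem.List.slice?, PySem.List.sliceIndices]
  norm_num
  cases L with
  | zero => norm_num [pvAsc]
  | succ M =>
    have hlen : (pvAsc a (M + 1 + 1)).length = M + 2 := by simp [pvAsc]
    rw [hlen]
    have hst : max (-2 + ((M + 2 : Nat) : Int)) (-1) = (M : Int) := by push_cast; omega
    rw [hst]
    have hif : (if 1 < M + 2 then ((M : Int) + 1).toNat else 0) = M + 1 := by
      rw [if_pos (by omega)]; omega
    rw [hif]
    have hcongr : ∀ x ∈ List.range (M + 1), (pvAsc a (M + 1 + 1))[((M : Int) + -(x:Int)).toNat]? = (fun x : Nat => some (a + ((M - x : Nat) : Int))) x := by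
      intro x hx
      simp only [List.mem_range] at hx
      have hx' : ((M : Int) + -(x : Int)).toNat = M - x := by omega
      rw [hx']
      simp only [pvAsc, List.getElem?_map]
      rw [List.getElem?_range (by omega)]
      rfl
    rw [List.filterMap_congr hcongr]
    have hmap : List.filterMap (fun x : Nat => some (a + ((M - x : Nat) : Int))) (List.range (M + 1))
        = List.map (fun x : Nat => a + ((M - x : Nat) : Int)) (List.range (M + 1)) := by
      simp
    rw [hmap]
    apply List.ext_getElem
    · simp [pvAsc]
    · intro i h1 h2
      simp only [List.length_map, List.length_range] at h1
      rw [List.getElem_reverse]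
      simp only [List.getElem_map, List.getElem_range, pvAsc, List.length_map, List.length_range]
      congr 1


theorem pvAsc_dropLast (a : Int) (n : Nat) : (pvAsc a (n + 1)).dropLast = pvAsc a n := by
  simp [pvAsc, List.range_succ]

theorem pvTrimDel_spec (P Q' : List Int) (v : Int) :
    pvTrimDel (P ++ v :: Q') (PySem.List.pyRange (P.length : Int) (((P ++ v :: Q').length : Int)) 1) v
      = P ++ Q' := by
  rw [PySem.List.pyRange_one_cons (by simp)]
  rw [pvTrimDel]
  have hget : PySem.List.pyGet? (P ++ v :: Q') (P.length : Int) = some v := by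
    rw [PySem.List.pyGet?_natCast]
    simp
  simp only [hget]
  rw [if_pos trivial, Int.toNat_natCast, List.eraseIdx_append_of_length_le (le_refl _)]
  simp

theorem pvTrimWhile_spec (P desc : List Int) (pe : Int) (hpe : pe = (P.length : Int)) :
    ∀ (n : Nat) (ov : Int) (ti : Nat), ov.toNat ≤ n → ti ≤ desc.length →
      pvTrimWhile desc pe (P ++ desc.drop ti) ov (ti : Int)
        = P ++ desc.drop (ti + min ov.toNat (desc.length - ti)) := by
  subst hpe
  intro n
  induction n with
  | zero =>
    intro ov ti hov hti
    rw [pvTrimWhile]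
    rw [dif_neg (by omega)]
    have : min ov.toNat (desc.length - ti) = 0 := by omega
    rw [this, Nat.add_zero]
  | succ n ih =>
    intro ov ti hov hti
    rw [pvTrimWhile]
    by_cases hc : 0 < ov ∧ (ti : Int) < (desc.length : Int)
    · rw [dif_pos hc]
      have hti' : ti < desc.length := by omega
      have hget : PySem.List.pyGet? desc (ti : Int) = some desc[ti] := by
        rw [PySem.List.pyGet?_natCast]
        simp [hti']
      simp only [hget]
      have hdrop : desc.drop ti = desc[ti]'hti' :: desc.drop (ti + 1) :=
        List.drop_eq_getElem_cons hti'
      rw [hdrop, pvTrimDel_spec P (desc.drop (ti + 1)) (desc[ti]'hti')]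
      have hcast : (ti : Int) + 1 = ((ti + 1 : Nat) : Int) := by push_cast; ring
      rw [hcast, ih (ov - 1) (ti + 1) (by omega) (by omega)]
      have harith : (ti + 1) + min (ov - 1).toNat (desc.length - (ti + 1))
          = ti + min ov.toNat (desc.length - ti) := by omega
      rw [harith]
    · rw [dif_neg hc]
      have : min ov.toNat (desc.length - ti) = 0 := by omega
      rw [this, Nat.add_zero]

theorem pvCore (up' peak desc : List Int) (nb pr : Int) (hnb : 1 ≤ nb)
    (hpr : (peak.length : Int) = pr) :
    (if nb < ((pvTrimWhile desc ((up'.length : Int) + pr) (up' ++ peak ++ desc) (((up' ++ peak ++ desc).length : Int) - nb) 0).length : Int)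
       then PySem.List.slice (pvTrimWhile desc ((up'.length : Int) + pr) (up' ++ peak ++ desc) (((up' ++ peak ++ desc).length : Int) - nb) 0) none (some nb)
       else pvTrimWhile desc ((up'.length : Int) + pr) (up' ++ peak ++ desc) (((up' ++ peak ++ desc).length : Int) - nb) 0)
    = (up' ++ peak ++ desc.drop (max 0 (min ((up'.length : Int) + (peak.length : Int) + (desc.length : Int) - nb) (desc.length : Int))).toNat).take nb.toNat := by
  have hpe : (up'.length : Int) + pr = (((up' ++ peak).length : Nat) : Int) := by
    simp only [List.length_append]; push_cast; omega
  have hspec := pvTrimWhile_spec (up' ++ peak) desc ((up'.length : Int) + pr) hpe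
      ((((up' ++ peak ++ desc).length : Nat) : Int) - nb).toNat
      ((((up' ++ peak ++ desc).length : Nat) : Int) - nb) 0 (le_refl _) (Nat.zero_le _)
  simp only [List.drop_zero, Nat.cast_zero, Nat.zero_add, Nat.sub_zero] at hspec
  rw [hspec]
  have hr : (max 0 (min ((up'.length : Int) + (peak.length : Int) + (desc.length : Int) - nb) (desc.length : Int))).toNat
      = min ((((up' ++ peak ++ desc).length : Nat) : Int) - nb).toNat desc.length := by
    simp only [List.length_append]; push_cast; omega
  rw [hr]
  set r := min ((((up' ++ peak ++ desc).length : Nat) : Int) - nb).toNat desc.length with hrdef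
  by_cases hc : nb < (((up' ++ peak ++ List.drop r desc).length : Nat) : Int)
  · rw [if_pos hc, PySem.List.slice_to _ (by omega)]
  · rw [if_neg hc]
    refine (List.take_of_length_le ?_).symm
    simp only [List.length_append] at hc ⊢
    omega

-- ===== VERDICT (by name: the statement is the Claim_ definition above) =====
theorem diamond_hidden_dims_spec : Claim_equal_diamond_hidden_dims := by
  unfold Claim_equal_diamond_hidden_dims
  intro m nb mp pr? hdom hpre
  obtain ⟨h1, h2, h3, h4⟩ := hpre
  set L := (m - mp).toNat with hL
  have hU : PySem.List.pyRange mp (m + 1) 1 = pvAsc mp (L + 1) := by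
    rw [pyRange_one_eq_asc mp (m + 1) (by omega)]
    congr 1
    omega
  have hup : PySem.List.pyRange mp m 1 = pvAsc mp L := by
    rw [pyRange_one_eq_asc mp m h2]
  have hdesc : PySem.List.pyRange (m - 1) (mp - 1) (-1) = (pvAsc mp L).reverse :=
    pyRange_down_eq m mp h2
  rcases pr? with _ | p
  · -- peak_repeats = None
    unfold Spec_diamond_hidden_dims diamond_hidden_dims diamond_hidden_dims_alt
    simp only [hU, hup, hdesc, slice?_neg2_asc, Option.getD_some, PySem.List.slice_to_neg_one,
      pvAsc_dropLast]
    have e1 : ((pvAsc mp (L + 1) ++ (pvAsc mp L).reverse).length : Int) = 2 * (L : Int) + 1 := by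
      simp [pvAsc]; ring
    have e2 : 2 * ((pvAsc mp L).length : Int) + 1 = 2 * (L : Int) + 1 := by
      simp [pvAsc]
    rw [e1, e2]
    rw [pvCore (pvAsc mp L) (List.replicate (1 + max 0 (nb - (2 * (L : Int) + 1))).toNat m)
      ((pvAsc mp L).reverse) nb (1 + max 0 (nb - (2 * (L : Int) + 1))) h1
      (by simp only [List.length_replicate]; omega)]
  · -- peak_repeats = some p
    simp only [Option.getD_some] at h4
    unfold Spec_diamond_hidden_dims diamond_hidden_dims diamond_hidden_dims_alt
    simp only [hU, hup, hdesc, slice?_neg2_asc, Option.getD_some, PySem.List.slice_to_neg_one,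
      pvAsc_dropLast]
    rw [pvCore (pvAsc mp L) (List.replicate p.toNat m) ((pvAsc mp L).reverse) nb p h1
      (by simp only [List.length_replicate]; omega)]
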